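-- pv_equiv track=rewrite | github.com/accts4mjs/PythonFun | HW20191017.py | func_hw2
-- ===== SOURCE A (Python) =====
-- def func_hw2(dna_seq):
--     result = ""
--     index = 0
--     dna_seq_len = len(dna_seq)
--     while index < dna_seq_len:
--         if dna_seq[index] == "T" or dna_seq[index] == "t":
--             result += "U"
--         elif dna_seq[index] != " ":
--             result += dna_seq[index]
--         index+= 1
--     result = result.upper()
--     return result
-- ===== SOURCE B (Python) =====
-- def func_hw2(dna_seq):
--     return dna_seq.upper().replace("T", "U").replace(" ", "")
-- ===== Notes on version B (the rewrite author's own statement) =====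
-- stated objective: idiomatic
-- what changed: Replaces the index-driven per-character accumulation loop with a chain of whole-string transforms: uppercase first, then one substitution pass and one space-deletion pass.
import Mathlib
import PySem

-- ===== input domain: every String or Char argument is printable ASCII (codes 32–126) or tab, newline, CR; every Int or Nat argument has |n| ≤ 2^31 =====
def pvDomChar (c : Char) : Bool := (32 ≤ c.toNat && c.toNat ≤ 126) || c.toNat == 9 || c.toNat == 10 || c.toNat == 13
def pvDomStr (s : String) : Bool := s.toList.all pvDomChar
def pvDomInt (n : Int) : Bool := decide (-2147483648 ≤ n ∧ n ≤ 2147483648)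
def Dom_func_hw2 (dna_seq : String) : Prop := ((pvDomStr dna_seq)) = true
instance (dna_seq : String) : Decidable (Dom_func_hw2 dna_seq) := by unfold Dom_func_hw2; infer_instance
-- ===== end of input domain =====

-- B replaces A's index-driven per-character accumulation loop by a chain of whole-string
-- transforms (uppercase, then T→U, then delete spaces); return values proved equal on Dom.

-- ===== PORT A =====
-- A's while-loop over indices, as structural recursion over the remaining characters
-- with the same accumulator `result`.
def func_hw2_go : List Char → List Char → List Char
  | [], result => result
  | c :: rest, result =>
      if c == 'T' || c == 't' then func_hw2_go rest (result ++ ['U'])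
      else if c != ' ' then func_hw2_go rest (result ++ [c])
      else func_hw2_go rest result

def func_hw2 (dna_seq : String) : String :=
  String.ofList (PySem.Chars.upper (func_hw2_go dna_seq.toList []))

-- ===== PORT B =====
def func_hw2_alt (dna_seq : String) : String :=
  PySem.Str.replace (PySem.Str.replace (PySem.Str.upper dna_seq) "T" "U") " " ""

-- ===== PRECONDITION & SPEC =====
def Spec_func_hw2 (dna_seq : String) (out : String) : Prop := out = func_hw2_alt dna_seq
instance (dna_seq : String) (out : String) : Decidable (Spec_func_hw2 dna_seq out) := by unfold Spec_func_hw2; infer_instance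

-- ===== CLAIM (what is proved, stated in full; the proofs are below) =====
def Claim_equal_func_hw2 : Prop := ∀ (dna_seq : String), Dom_func_hw2 dna_seq → Spec_func_hw2 dna_seq (func_hw2 dna_seq)

-- ===== LEMMAS AND PROOFS =====

-- per-character transform performed by A's loop (before the final upper)
def pvA1 (c : Char) : List Char :=
  if c == 'T' || c == 't' then ['U'] else if c != ' ' then [c] else []

lemma func_hw2_go_eq (cs : List Char) (acc : List Char) :
    func_hw2_go cs acc = acc ++ cs.flatMap pvA1 := by
  induction cs generalizing acc with
  | nil => simp [func_hw2_go]
  | cons c rest ih =>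
      simp only [func_hw2_go, pvA1, List.flatMap_cons]
      split
      · rw [ih]; simp
      · split
        · rw [ih]; simp
        · rw [ih]; simp

-- replacing a single character old-pattern is a flatMap
lemma replace_go_single (a : Char) (new : List Char) :
    ∀ (cs : List Char) (fuel : Nat) (acc : List Char), cs.length ≤ fuel →
      PySem.Chars.replace.go [a] new fuel cs acc =
        acc.reverse ++ cs.flatMap (fun c => if c = a then new else [c]) := by
  intro cs
  induction cs with
  | nil =>
      intro fuel acc _
      cases fuel <;> simp [PySem.Chars.replace.go]
  | cons c t ih =>
      intro fuel acc hle
      cases fuel with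
      | zero => simp at hle
      | succ n =>
          simp only [PySem.Chars.replace.go]
          by_cases h : c = a
          · subst h
            have hp : List.isPrefixOf [c] (c :: t) = true := by
              simp [List.isPrefixOf]
            rw [if_pos hp]
            have hd : List.drop [c].length (c :: t) = t := rfl
            rw [hd]
            rw [ih n (new.reverse ++ acc) (by simpa using Nat.le_of_succ_le_succ hle)]
            simp
          · have hp : List.isPrefixOf [a] (c :: t) = false := by
              simp [List.isPrefixOf]
              intro hh; exact absurd hh.symm h
            rw [if_neg (by simp [hp])]
            rw [ih n (c :: acc) (by simpa using Nat.le_of_succ_le_succ hle)]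
            simp [h]

lemma replace_single (a : Char) (new cs : List Char) :
    PySem.Chars.replace cs [a] new = cs.flatMap (fun c => if c = a then new else [c]) := by
  unfold PySem.Chars.replace
  rw [if_neg (by simp)]
  rw [replace_go_single a new cs cs.length [] (le_refl _)]
  simp

-- B's composite per-character transform
def pvB1 (c : Char) : List Char :=
  let u := PySem.Chars.upperChar c
  if u = 'T' then ['U'] else if u = ' ' then [] else [u]

-- the two per-character transforms agree on every domain character
lemma perChar_eq (c : Char) (h : pvDomChar c = true) :
    (pvA1 c).map PySem.Chars.upperChar = pvB1 c := by
  have hn : c.toNat < 127 := by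
    unfold pvDomChar at h
    simp only [Bool.or_eq_true, Bool.and_eq_true, decide_eq_true_eq, beq_iff_eq] at h
    omega
  have key : ∀ n, n < 127 →
      (pvA1 (Char.ofNat n)).map PySem.Chars.upperChar = pvB1 (Char.ofNat n) := by decide
  have := key c.toNat hn
  rwa [Char.ofNat_toNat] at this

lemma flatMap_eq (cs : List Char) (h : ∀ c ∈ cs, pvDomChar c = true) :
    (cs.flatMap pvA1).map PySem.Chars.upperChar =
      ((cs.map PySem.Chars.upperChar).flatMap
          (fun c => if c = 'T' then ['U'] else [c])).flatMap
        (fun c => if c = ' ' then ([] : List Char) else [c]) := by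
  induction cs with
  | nil => simp
  | cons c rest ih =>
      simp only [List.flatMap_cons, List.map_cons, List.map_append, List.flatMap_append]
      rw [ih (fun x hx => h x (List.mem_cons_of_mem _ hx))]
      congr 1
      have hc := perChar_eq c (h c (List.mem_cons_self ..))
      rw [hc]
      unfold pvB1
      by_cases h1 : PySem.Chars.upperChar c = 'T'
      · simp [h1]
      · by_cases h2 : PySem.Chars.upperChar c = ' ' <;> simp [h1, h2]

-- ===== VERDICT (by name: the statement is the Claim_ definition above) =====
theorem func_hw2_spec : Claim_equal_func_hw2 := by
  intro s hdom
  unfold Spec_func_hw2 func_hw2 func_hw2_alt PySem.Str.replace PySem.Str.upper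
  rw [← String.toList_inj]
  simp only [String.toList_ofList]
  rw [func_hw2_go_eq, List.nil_append]
  rw [show "T".toList = ['T'] from rfl, show "U".toList = ['U'] from rfl,
     show " ".toList = [' '] from rfl, show "".toList = ([] : List Char) from rfl]
  rw [replace_single, replace_single]
  unfold PySem.Chars.upper
  have hall : ∀ c ∈ s.toList, pvDomChar c = true := by
    intro c hc
    unfold Dom_func_hw2 pvDomStr at hdom
    exact List.all_eq_true.mp hdom c hc
  simpa using flatMap_eq s.toList hall
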